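-- pv_equiv track=rewrite | github.com/ehdwo98/Problem_Solving | 프로그래머스/1/1845. 폰켓몬/폰켓몬.py | solution
-- ===== SOURCE A (Python) =====
-- def solution(nums):
--     answer = 0
--     dic=dict()
--     for num in nums:
--         if num not in dic:
--             dic[num]=0
--         dic[num]+=1
--     l=len(list(dic.items()))
--     answer=l if l<len(nums)//2 else len(nums)//2
--     return answer
-- ===== SOURCE B (Python) =====
-- def solution(nums):
--     s = sorted(nums)
--     distinct = 0
--     prev = None
--     for x in s:
--         if prev is None or x != prev:
--             distinct += 1
--         prev = x
--     return min(distinct, len(nums) // 2)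
-- ===== Notes on version B (the rewrite author's own statement) =====
-- stated objective: alternative
-- what changed: Replaces the hash-dict frequency table with sorting plus a single adjacent-difference scan to count distinct elements, and returns min(distinct, n//2) directly.
import Mathlib
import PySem

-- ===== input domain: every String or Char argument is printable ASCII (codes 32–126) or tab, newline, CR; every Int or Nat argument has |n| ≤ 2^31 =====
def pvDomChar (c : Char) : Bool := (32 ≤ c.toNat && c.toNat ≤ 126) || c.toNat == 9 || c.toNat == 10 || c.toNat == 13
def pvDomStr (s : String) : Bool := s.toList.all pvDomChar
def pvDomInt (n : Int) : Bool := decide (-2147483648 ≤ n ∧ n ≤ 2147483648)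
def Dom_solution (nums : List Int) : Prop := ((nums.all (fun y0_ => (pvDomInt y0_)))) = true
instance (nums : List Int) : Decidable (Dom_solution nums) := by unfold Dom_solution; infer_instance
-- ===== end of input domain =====

-- B replaces A's hash-dict frequency count with sort + one adjacent-difference scan (alternative algorithm, same values everywhere).

-- ===== PORT A =====
-- A's loop body: if num not in dic: dic[num] = 0; then dic[num] += 1.
def pvStepA (d : PySem.Dict Int Int) (num : Int) : PySem.Dict Int Int :=
  let d := if !(d.contains num) then d.insert num 0 else d
  d.modify num 0 (· + 1)

-- A: build a frequency dict, l = number of its items, return l if l < len(nums)//2 else len(nums)//2.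
def solution (nums : List Int) : Int :=
  let dic := nums.foldl pvStepA PySem.Dict.empty
  let l : Int := (dic.items.length : Int)
  if l < PySem.Int.floordiv (nums.length : Int) 2 then l
  else PySem.Int.floordiv (nums.length : Int) 2

-- ===== PORT B =====
-- B's loop body: increment the count when prev is None or the element differs from prev; remember the element.
def pvScanStep (st : Int × Option Int) (x : Int) : Int × Option Int :=
  (if st.2 = some x then st.1 else st.1 + 1, some x)

def solution_alt (nums : List Int) : Int :=
  let s := PySem.List.sorted nums (fun x => x) false
  let r := s.foldl pvScanStep (0, none)
  min r.1 (PySem.Int.floordiv (nums.length : Int) 2)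

-- ===== PRECONDITION & SPEC =====
def Spec_solution (nums : List Int) (out : Int) : Prop := out = solution_alt nums
instance (nums : List Int) (out : Int) : Decidable (Spec_solution nums out) := by unfold Spec_solution; infer_instance

-- ===== CLAIM (what is proved, stated in full; the proofs are below) =====
def Claim_equal_solution : Prop := ∀ (nums : List Int), Dom_solution nums → Spec_solution nums (solution nums)

-- ===== LEMMAS AND PROOFS =====

-- One step of A's loop adds the key as a set insertion.
lemma keys_stepA (d : PySem.Dict Int Int) (num : Int) :
    (pvStepA d num).keys = PySem.Set.add d.keys num := by
  unfold pvStepA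
  by_cases h : d.contains num = true
  · have hmem : num ∈ d.keys := (PySem.Dict.contains_iff_mem_keys d num).mp h
    rw [if_neg (by simp [h])]
    rw [PySem.Dict.keys_modify, PySem.Dict.keys_insert_of_contains d _ h]
    simp [PySem.Set.add, hmem]
  · have h' : d.contains num = false := by simpa using h
    have hmem : num ∉ d.keys := fun hm => h ((PySem.Dict.contains_iff_mem_keys d num).mpr hm)
    rw [if_pos (by simp [h'])]
    rw [PySem.Dict.keys_modify,
      PySem.Dict.keys_insert_of_contains _ _ (PySem.Dict.contains_insert_self d num 0),
      PySem.Dict.keys_insert_of_not_contains d _ h']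
    simp [PySem.Set.add, hmem]

-- A's whole loop: the keys of the resulting dict are the fold of set-insertions.
lemma keys_foldA (nums : List Int) (d : PySem.Dict Int Int) :
    (nums.foldl pvStepA d).keys = nums.foldl PySem.Set.add d.keys := by
  induction nums generalizing d with
  | nil => rfl
  | cons x xs ih => rw [List.foldl_cons, List.foldl_cons, ih, keys_stepA]

-- The set of a list has as many elements as the Finset of the list's members.
lemma ofList_length_eq_card (nums : List Int) :
    (PySem.Set.ofList nums).length = nums.toFinset.card := by
  have hnd := PySem.Set.nodup_ofList nums
  have hfs : (PySem.Set.ofList nums).toFinset = nums.toFinset := by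
    ext x; simp [PySem.Set.mem_ofList]
  calc (PySem.Set.ofList nums).length = (PySem.Set.ofList nums).toFinset.card :=
        (List.toFinset_card_of_nodup hnd).symm
    _ = nums.toFinset.card := by rw [hfs]

-- Inserting x and then deleting it leaves one element fewer than inserting it.
lemma card_insert_eq_card_erase_add_one (t : Finset Int) (x : Int) :
    (insert x t).card = (t.erase x).card + 1 := by
  rw [← Finset.erase_insert_eq_erase]
  exact (Finset.card_erase_add_one (Finset.mem_insert_self x t)).symm

-- B's scan, previous element p below everything left: counts the distinct values other than p.
lemma scan_some (s : List Int) :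
    s.Pairwise (· ≤ ·) → ∀ (c p : Int), (∀ y ∈ s, p ≤ y) →
      (s.foldl pvScanStep (c, some p)).1 = c + ((s.toFinset.erase p).card : Int) := by
  induction s with
  | nil => intro _ c p _; simp
  | cons x xs ih =>
    intro hp c p hle
    have hx : ∀ y ∈ xs, x ≤ y := (List.pairwise_cons.mp hp).1
    have hxs : xs.Pairwise (· ≤ ·) := (List.pairwise_cons.mp hp).2
    by_cases hpx : p = x
    · subst hpx
      have hstep : (List.foldl pvScanStep (c, some p) (p :: xs)).1
          = (xs.foldl pvScanStep (c, some p)).1 := by simp [pvScanStep]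
      rw [hstep, ih hxs c p hx]
      congr 2
      simp [List.toFinset_cons, Finset.erase_insert_eq_erase]
    · have hpnot : p ∉ (x :: xs).toFinset := by
        simp only [List.toFinset_cons, Finset.mem_insert, List.mem_toFinset]
        rintro (rfl | hmem)
        · exact absurd rfl hpx
        · exact absurd (lt_of_le_of_ne (hle x (by simp)) hpx) (not_lt_of_ge (hx p hmem))
      have hstep : (List.foldl pvScanStep (c, some p) (x :: xs)).1
          = (xs.foldl pvScanStep (c + 1, some x)).1 := by
        simp [pvScanStep, hpx]
      rw [hstep, ih hxs (c + 1) x hx]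
      have hcard : ((x :: xs).toFinset.erase p).card = (xs.toFinset.erase x).card + 1 := by
        rw [Finset.erase_eq_of_notMem hpnot, List.toFinset_cons,
          card_insert_eq_card_erase_add_one]
      rw [hcard]; push_cast; ring

-- B's scan from the initial state counts the distinct values of a sorted list.
lemma scan_none (s : List Int) (hp : s.Pairwise (· ≤ ·)) :
    (s.foldl pvScanStep ((0 : Int), none)).1 = (s.toFinset.card : Int) := by
  cases s with
  | nil => simp
  | cons x xs =>
    have hx : ∀ y ∈ xs, x ≤ y := (List.pairwise_cons.mp hp).1
    have hxs : xs.Pairwise (· ≤ ·) := (List.pairwise_cons.mp hp).2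
    have hstep : (List.foldl pvScanStep ((0 : Int), none) (x :: xs)).1
        = (xs.foldl pvScanStep ((1 : Int), some x)).1 := by simp [pvScanStep]
    rw [hstep, scan_some xs hxs 1 x hx]
    rw [List.toFinset_cons, card_insert_eq_card_erase_add_one]
    push_cast; ring

-- ===== VERDICT (by name: the statement is the Claim_ definition above) =====
theorem solution_spec : Claim_equal_solution := by
  intro nums _
  unfold Spec_solution solution solution_alt
  have hA : ((nums.foldl pvStepA PySem.Dict.empty).items.length : Int)
      = (nums.toFinset.card : Int) := by
    have hkl : ∀ d : PySem.Dict Int Int, d.keys.length = d.items.length := by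
      intro d; simp [PySem.Dict.keys]
    have hlen : (nums.foldl pvStepA PySem.Dict.empty).items.length
        = (PySem.Set.ofList nums).length := by
      rw [← hkl, keys_foldA, PySem.Set.ofList_eq_foldl, PySem.Dict.keys_empty]
    rw [hlen, ofList_length_eq_card]
  have hsortfs : (PySem.List.sorted nums (fun x => x) false).toFinset = nums.toFinset :=
    List.toFinset_eq_of_perm _ _ (PySem.List.sorted_perm nums (fun x => x) false)
  have hB : ((PySem.List.sorted nums (fun x => x) false).foldl pvScanStep ((0 : Int), none)).1
      = (nums.toFinset.card : Int) := by
    rw [scan_none _ (by simpa using PySem.List.sorted_pairwise nums (fun x => x)), hsortfs]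
  simp only
  rw [hA, hB, min_def]
  split_ifs <;> omega
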